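-- pv_equiv track=rewrite | github.com/SLFM23/TransPredict | Utils/utils.py | count_group_char
-- ===== SOURCE A (Python) =====
-- from itertools import groupby
--
-- def count_group_char(s, char, min_chars = -1):
--     result = 0
--     groups = groupby(s)
--
--     groupByChars = [(label, sum(1 for _ in group)) for label, group in groups]
--
--     for g in groupByChars:
--         if g[0] == char and g[1] >= min_chars:
--             result += 1
--
--     return result
-- ===== SOURCE B (Python) =====
-- def count_group_char(s, char, min_chars=-1):
--     t = list(s)
--     n = len(t)
--     m = min_chars if min_chars > 1 else 1
--     count = 0
--     for i in range(n - m + 1):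
--         if (i == 0 or t[i - 1] != char) and all(t[i + j] == char for j in range(m)):
--             count += 1
--     return count
-- ===== Notes on version B (the rewrite author's own statement) =====
-- stated objective: alternative
-- what changed: Replaces groupby plus a run-length list with positional window counting: count indices i that start a run (i == 0 or previous element differs from char) and whose next m = max(min_chars, 1) elements all equal char; no run lengths are ever computed.
import Mathlib
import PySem

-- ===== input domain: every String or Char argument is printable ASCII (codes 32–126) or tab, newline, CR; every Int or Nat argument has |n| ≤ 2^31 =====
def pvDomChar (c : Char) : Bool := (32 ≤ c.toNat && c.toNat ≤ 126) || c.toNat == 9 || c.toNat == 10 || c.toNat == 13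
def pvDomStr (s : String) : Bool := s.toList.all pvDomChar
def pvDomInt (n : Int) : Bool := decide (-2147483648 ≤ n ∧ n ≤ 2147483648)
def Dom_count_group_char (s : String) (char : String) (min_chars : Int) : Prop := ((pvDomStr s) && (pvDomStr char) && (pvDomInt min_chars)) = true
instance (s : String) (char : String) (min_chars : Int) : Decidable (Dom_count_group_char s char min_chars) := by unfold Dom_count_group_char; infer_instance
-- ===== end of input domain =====

-- B replaces groupby + an intermediate run-length list with positional window counting over indices (objective: alternative; equal cost).


-- ===== PORT A =====
-- itertools.groupby over the string, materialised as the list [(label, run length)]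
-- (labels are the 1-character strings Python iteration over s yields)
def cgcGroups : List Char → List (String × Int)
  | [] => []
  | c :: rest =>
      (String.singleton c, 1 + (rest.takeWhile (fun d => d == c)).length) ::
        cgcGroups (rest.dropWhile (fun d => d == c))
  termination_by l => l.length
  decreasing_by
    simpa using Nat.lt_succ_of_le (List.length_dropWhile_le _ _)

-- the 'for g in groupByChars' loop
def cgcLoop (char : String) (min_chars : Int) : List (String × Int) → Int → Int
  | [], result => result
  | g :: gs, result =>
      cgcLoop char min_chars gs
        (if g.1 == char ∧ g.2 ≥ min_chars then result + 1 else result)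

def count_group_char (s : String) (char : String) (min_chars : Int) : Int :=
  cgcLoop char min_chars (cgcGroups s.toList) 0

-- ===== PORT B =====
-- window counting: count i in range(n - m + 1) with m = max(min_chars, 1) such that
-- i starts a run (i == 0 or t[i-1] != char) and the next m elements all equal char
def count_group_char_alt (s : String) (char : String) (min_chars : Int) : Int :=
  let t := s.toList
  let n : Int := t.length
  let m : Int := if min_chars > 1 then min_chars else 1
  (PySem.List.pyRange 0 (n - m + 1) 1).foldl
    (fun count i =>
      if ((i == 0) || !((PySem.List.pyGet? t (i - 1)).map String.singleton == some char))
          && (PySem.List.pyRange 0 m 1).all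
              (fun j => (PySem.List.pyGet? t (i + j)).map String.singleton == some char)
      then count + 1 else count) 0

-- ===== PRECONDITION & SPEC =====
def Spec_count_group_char (s : String) (char : String) (min_chars : Int) (out : Int) : Prop := out = count_group_char_alt s char min_chars
instance (s : String) (char : String) (min_chars : Int) (out : Int) : Decidable (Spec_count_group_char s char min_chars out) := by unfold Spec_count_group_char; infer_instance

-- ===== CLAIM (what is proved, stated in full; the proofs are below) =====
def Claim_equal_count_group_char : Prop := ∀ (s : String) (char : String) (min_chars : Int), Dom_count_group_char s char min_chars → Spec_count_group_char s char min_chars (count_group_char s char min_chars)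

-- ===== LEMMAS AND PROOFS =====

-- character c matches the parameter `char` (Python's `s[i] == char` on 1-char slices)
def pvP (char : String) (c : Char) : Bool := String.singleton c == char

-- the window condition of B at natural index i, with the i = 0 case parameterised by `ok`
def pvGoodOk (char : String) (m' : ℕ) (ok : Bool) (t : List Char) (i : ℕ) : Bool :=
  (if i = 0 then ok else !((t[i-1]?).map String.singleton == some char))
    && decide (m' ≤ ((t.drop i).takeWhile (pvP char)).length)

def pvW (char : String) (m' : ℕ) (ok : Bool) (t : List Char) : ℕ :=
  (List.range (t.length + 1 - m')).countP (pvGoodOk char m' ok t)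

theorem pvCountP_congr {α : Type} {p q : α → Bool} {l : List α} (h : ∀ x ∈ l, p x = q x) :
    l.countP p = l.countP q :=
  List.countP_congr (fun x hx => by rw [h x hx])

theorem pvP_unique {char : String} {c x : Char} (hc : pvP char c = true) (hx : x ≠ c) :
    pvP char x = false := by
  unfold pvP at hc ⊢
  have hceq : String.singleton c = char := by simpa using hc
  rw [← hceq]
  simp only [beq_eq_false_iff_ne, ne_eq]
  intro he
  apply hx
  have := congrArg String.toList he
  simpa using this

theorem pvAll_eq (char : String) : ∀ (t : List Char) (mm : ℕ),
    ((List.range mm).all (fun j => (t[j]?.map String.singleton == some char))) =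
      decide (mm ≤ (t.takeWhile (pvP char)).length) := by
  intro t
  induction t with
  | nil =>
      intro mm
      cases mm with
      | zero => simp
      | succ k =>
          rw [List.range_succ_eq_map]
          simp
  | cons c t ih =>
      intro mm
      cases mm with
      | zero => simp
      | succ k =>
          rw [List.range_succ_eq_map]
          by_cases hP : pvP char c = true
          · have : (List.map Nat.succ (List.range k)).all
                (fun j => ((c :: t)[j]?.map String.singleton == some char)) =
                (List.range k).all (fun j => (t[j]?.map String.singleton == some char)) := by
              rw [List.all_map]
              rfl
            simp only [List.all_cons, this, ih k]
            unfold pvP at hP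
            simp [hP, pvP]
          · have hP' : (String.singleton c == char) = false := by
              unfold pvP at hP; simpa using hP
            simp [hP', pvP]

-- B's port equals the natural-index window count
theorem alt_eq_pvW (s char : String) (min_chars : Int) :
    count_group_char_alt s char min_chars =
      ((pvW char ((if min_chars > 1 then min_chars else 1).toNat) true s.toList : ℕ) : Int) := by
  unfold count_group_char_alt pvW
  set t := s.toList with ht
  set m : Int := if min_chars > 1 then min_chars else 1 with hm
  have hm1 : 1 ≤ m := by rw [hm]; split <;> omega
  rw [PySem.List.foldl_if_add_one]
  rw [PySem.List.pyRange_one 0 ((t.length : Int) - m + 1)]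
  rw [List.countP_map]
  have hlen : ((t.length : Int) - m + 1 - 0).toNat = t.length + 1 - m.toNat := by omega
  rw [hlen, Int.zero_add]
  congr 1
  apply pvCountP_congr
  intro k _
  simp only [Function.comp]
  have hall : (PySem.List.pyRange 0 m 1).all
      (fun j => ((PySem.List.pyGet? t ((0 : Int) + (k : Int) + j)).map String.singleton == some char)) =
      decide (m.toNat ≤ ((t.drop k).takeWhile (pvP char)).length) := by
    rw [PySem.List.pyRange_one]
    rw [List.all_map]
    have : ∀ j : ℕ, (PySem.List.pyGet? t ((0 : Int) + (k : Int) + ((0 : Int) + (j : Int)))) = t[k + j]? := by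
      intro j
      have : ((0 : Int) + (k : Int) + ((0 : Int) + (j : Int))) = ((k + j : ℕ) : Int) := by push_cast; ring
      rw [this, PySem.List.pyGet?_natCast]
    have hcomp : ((fun j : Int => ((PySem.List.pyGet? t ((0 : Int) + (k : Int) + j)).map String.singleton == some char)) ∘ (fun j : ℕ => (0 : Int) + (j : Int))) =
        (fun j : ℕ => ((t.drop k)[j]?.map String.singleton == some char)) := by
      funext j
      simp only [Function.comp]
      rw [this j]
      rw [List.getElem?_drop]
    rw [hcomp]
    have : (m - 0).toNat = m.toNat := by omega
    rw [this, pvAll_eq]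
  cases k with
  | zero =>
      simp only [pvGoodOk, Nat.cast_zero, add_zero]
      rw [show ((0 : Int) == 0) = true from rfl]
      rw [Bool.true_or, Bool.true_and]
      simpa using hall
  | succ k' =>
      have h0 : (((0 : Int) + ((k' + 1 : ℕ) : Int)) == 0) = false := by
        have hne : (0 : Int) + ((k' + 1 : ℕ) : Int) ≠ 0 := by push_cast; omega
        simpa using hne
      have hget : PySem.List.pyGet? t ((0 : Int) + ((k' + 1 : ℕ) : Int) - 1) = t[k']? := by
        have : ((0 : Int) + ((k' + 1 : ℕ) : Int) - 1) = ((k' : ℕ) : Int) := by push_cast; ring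
        rw [this, PySem.List.pyGet?_natCast]
      rw [h0, Bool.false_or]
      rw [hget]
      rw [hall]
      simp [pvGoodOk]

-- peeling one element off the window count
theorem pvW_cons (char : String) (m' : ℕ) (_hm : 1 ≤ m') (ok : Bool) (c : Char) (t : List Char) :
    pvW char m' ok (c :: t) =
      (if ok && decide (m' ≤ ((c :: t).takeWhile (pvP char)).length) then 1 else 0) +
        pvW char m' (!(pvP char c)) t := by
  unfold pvW
  by_cases hbig : t.length + 2 ≤ m'
  · have h1 : (c :: t).length + 1 - m' = 0 := by simp; omega
    have h2 : t.length + 1 - m' = 0 := by omega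
    have h3 : decide (m' ≤ ((c :: t).takeWhile (pvP char)).length) = false := by
      have := (List.takeWhile_sublist (l := c :: t) (pvP char)).length_le
      simp only [List.length_cons] at this
      simp; omega
    rw [h1, h2, h3]
    simp
  · have h1 : (c :: t).length + 1 - m' = (t.length + 1 - m') + 1 := by simp; omega
    rw [h1, List.range_succ_eq_map, List.countP_cons, List.countP_map]
    have h0 : pvGoodOk char m' ok (c :: t) 0 =
        (ok && decide (m' ≤ ((c :: t).takeWhile (pvP char)).length)) := by
      simp [pvGoodOk]
      try rfl
    have hsh : ∀ i : ℕ, (pvGoodOk char m' ok (c :: t) ∘ Nat.succ) i = pvGoodOk char m' (!(pvP char c)) t i := by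
      intro i
      cases i with
      | zero =>
          simp [pvGoodOk, pvP, Function.comp]
          try rfl
      | succ j =>
          simp [pvGoodOk, Function.comp]
          try rfl
    rw [pvCountP_congr (fun i _ => hsh i), h0]
    omega

-- with ok = false and a run of the matching character, nothing is counted
theorem pvW_replicate_match (char : String) (m' : ℕ) (hm : 1 ≤ m') (c : Char)
    (hP : pvP char c = true) :
    ∀ (k : ℕ) (rest : List Char),
      pvW char m' false (List.replicate k c ++ rest) = pvW char m' false rest := by
  intro k
  induction k with
  | zero => intro rest; simp
  | succ k' ih =>
      intro rest
      rw [List.replicate_succ, List.cons_append, pvW_cons char m' hm, hP]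
      simpa using ih rest

-- a run of a non-matching character contributes nothing and keeps ok = true
theorem pvW_replicate_nonmatch (char : String) (m' : ℕ) (hm : 1 ≤ m') (c : Char)
    (hP : pvP char c = false) :
    ∀ (k : ℕ) (rest : List Char),
      pvW char m' true (List.replicate k c ++ rest) = pvW char m' true rest := by
  intro k
  induction k with
  | zero => intro rest; simp
  | succ k' ih =>
      intro rest
      rw [List.replicate_succ, List.cons_append, pvW_cons char m' hm, hP]
      have h0 : ((c :: (List.replicate k' c ++ rest)).takeWhile (pvP char)).length = 0 := by
        simp [hP]
      rw [h0]
      have hd : decide (m' ≤ 0) = false := by simp; omega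
      rw [hd]
      simpa using ih rest

-- ok is irrelevant when the list does not begin with a long-enough matching run
theorem pvW_ok_irrel (char : String) (m' : ℕ) (ok : Bool) (t : List Char)
    (h : decide (m' ≤ (t.takeWhile (pvP char)).length) = false) :
    pvW char m' ok t = pvW char m' true t := by
  unfold pvW
  apply pvCountP_congr
  intro i _
  cases i with
  | zero =>
      have h'' : ¬ m' ≤ (List.takeWhile (pvP char) t).length := by simpa using h
      simp [pvGoodOk, h'']
  | succ j => simp [pvGoodOk]

theorem cgc_takeWhile_eq_replicate (c : Char) (l : List Char) :
    l.takeWhile (fun d => d == c) = List.replicate (l.takeWhile (fun d => d == c)).length c := by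
  apply List.eq_replicate_of_mem
  intro x hx
  have := List.mem_takeWhile_imp hx
  simpa using this

theorem cgc_head_dropWhile (c : Char) (l : List Char) (x : Char)
    (hx : (l.dropWhile (fun d => d == c)).head? = some x) : (x == c) = false := by
  have := List.head?_dropWhile_not (fun d => d == c) l
  rw [hx] at this
  simpa using this

-- matching runs: takeWhile for pvP sees exactly the run of c
theorem takeWhile_pvP_replicate (char : String) (c : Char) (hP : pvP char c = true) :
    ∀ (k : ℕ) (rest : List Char), rest.head? ≠ some c →
      ((List.replicate k c ++ rest).takeWhile (pvP char)).length = k := by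
  intro k
  induction k with
  | zero =>
      intro rest hr
      cases rest with
      | nil => simp
      | cons x xs =>
          have hx : x ≠ c := by simpa using hr
          have hPx : pvP char x = false := pvP_unique hP hx
          simp [hPx]
  | succ k' ih =>
      intro rest hr
      rw [List.replicate_succ, List.cons_append]
      have hstep : List.takeWhile (pvP char) (c :: (List.replicate k' c ++ rest)) =
          c :: List.takeWhile (pvP char) (List.replicate k' c ++ rest) := by
        simp [hP]
      rw [hstep, List.length_cons, ih rest hr]

-- ===== A = B : main induction over the group structure =====
theorem cgc_main (char : String) (min_chars : Int) :
    ∀ (N : ℕ) (l : List Char), l.length ≤ N → ∀ res : Int,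
      cgcLoop char min_chars (cgcGroups l) res =
        res + ((pvW char ((if min_chars > 1 then min_chars else 1).toNat) true l : ℕ) : Int) := by
  intro N
  induction N with
  | zero =>
      intro l hl res
      have : l = [] := List.length_eq_zero_iff.mp (Nat.le_zero.mp hl)
      subst this
      have hm : 1 ≤ (if min_chars > 1 then min_chars else 1).toNat := by split <;> omega
      rw [cgcGroups]
      simp [cgcLoop, pvW, Nat.sub_eq_zero_of_le hm]
  | succ N ih =>
      intro l hl res
      set m' : ℕ := (if min_chars > 1 then min_chars else 1).toNat with hm'
      have hm : 1 ≤ m' := by rw [hm']; split <;> omega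
      cases l with
      | nil =>
          rw [cgcGroups]
          simp [cgcLoop, pvW, Nat.sub_eq_zero_of_le hm]
      | cons c rest0 =>
          rw [cgcGroups]
          set k : ℕ := (rest0.takeWhile (fun d => d == c)).length with hk
          set rest : List Char := rest0.dropWhile (fun d => d == c) with hrest
          have hdecomp : rest0 = List.replicate k c ++ rest := by
            rw [hk, hrest, ← cgc_takeWhile_eq_replicate, List.takeWhile_append_dropWhile]
          have hrestlen : rest.length ≤ N := by
            have h1 : rest.length ≤ rest0.length := by
              rw [hrest]; exact List.length_dropWhile_le _ _
            have h2 : rest0.length + 1 ≤ N + 1 := by simpa using hl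
            omega
          have hrhead : rest.head? ≠ some c := by
            intro hsome
            rw [hrest] at hsome
            have := cgc_head_dropWhile c rest0 c hsome
            simp at this
          rw [cgcLoop]
          rw [ih rest hrestlen]
          by_cases hP : pvP char c = true
          · -- matching run of length k + 1
            have hfull : pvW char m' true (c :: rest0) =
                (if decide (m' ≤ k + 1) then 1 else 0) + pvW char m' true rest := by
              have hcons := pvW_cons char m' hm true c rest0
              have htw : ((c :: rest0).takeWhile (pvP char)).length = k + 1 := by
                have : (c :: rest0) = List.replicate (k + 1) c ++ rest := by
                  rw [List.replicate_succ, List.cons_append, ← hdecomp]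
                rw [this]
                exact takeWhile_pvP_replicate char c hP (k + 1) rest hrhead
              rw [htw] at hcons
              rw [hcons]
              have htr : decide (m' ≤ (rest.takeWhile (pvP char)).length) = false := by
                have : (rest.takeWhile (pvP char)).length = 0 := by
                  cases hr : rest with
                  | nil => simp
                  | cons x xs =>
                      have hx : x ≠ c := by
                        intro hxc
                        apply hrhead
                        rw [hr, hxc]
                        rfl
                      have hPx : pvP char x = false := pvP_unique hP hx
                      simp [hPx]
                rw [this]
                simp; omega
              have hrepl : pvW char m' (!(pvP char c)) rest0 = pvW char m' true rest := by
                rw [hP]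
                show pvW char m' false rest0 = pvW char m' true rest
                rw [hdecomp, pvW_replicate_match char m' hm c hP k rest]
                exact pvW_ok_irrel char m' false rest htr
              rw [hrepl]
              simp
            rw [hfull]
            have hcond : ((String.singleton c == char) = true ∧ (1 + (k : Int)) ≥ min_chars) ↔ (m' ≤ k + 1) := by
              constructor
              · rintro ⟨-, hge⟩
                rw [hm']
                split
                · next h => omega
                · omega
              · intro hle
                refine ⟨hP, ?_⟩
                rw [hm'] at hle
                by_cases h1 : min_chars > 1
                · rw [if_pos h1] at hle; omega
                · omega
            by_cases hc : (String.singleton c == char) = true ∧ (1 + (k : Int)) ≥ min_chars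
            · rw [if_pos (by exact_mod_cast hc), if_pos (by simpa using hcond.mp hc)]
              push_cast
              ring
            · rw [if_neg (by exact_mod_cast hc)]
              rw [if_neg (by simpa using (fun h => hc (hcond.mpr h)))]
              push_cast
              ring
          · -- non-matching run: contributes nothing on both sides
            have hPf : pvP char c = false := by
              simpa using hP
            have hAcond : ¬ ((String.singleton c == char) = true ∧ (1 + (k : Int)) ≥ min_chars) := by
              rintro ⟨h1, -⟩
              unfold pvP at hPf
              rw [h1] at hPf
              exact Bool.true_eq_false.mp hPf
            rw [if_neg (by exact_mod_cast hAcond)]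
            have : pvW char m' true (c :: rest0) = pvW char m' true rest := by
              have : (c :: rest0) = List.replicate (k + 1) c ++ rest := by
                rw [List.replicate_succ, List.cons_append, ← hdecomp]
              rw [this]
              exact pvW_replicate_nonmatch char m' hm c hPf (k + 1) rest
            rw [this]

-- ===== VERDICT (by name: the statement is the Claim_ definition above) =====
theorem count_group_char_spec : Claim_equal_count_group_char := by
  intro s char min_chars _
  unfold Spec_count_group_char count_group_char
  rw [alt_eq_pvW]
  rw [cgc_main char min_chars s.toList.length s.toList (le_refl _) 0]
  ring
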